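-- pv_equiv track=rewrite | github.com/liupengsay/Algorithm | src/dp/linear_dp/problem.py | lc_2361
-- ===== SOURCE A (Python) =====
-- from typing import List
--
-- def lc_2361(regular: List[int], express: List[int], express_cost: int) -> List[int]:
--     """
--     url: https://leetcode.cn/problems/minimum-costs-using-the-train-line/
--     tag: linear_dp
--     """
--     n = len(regular)
--     cost = [[0, 0] for _ in range(n + 1)]
--     cost[0][1] = express_cost
--     for i in range(1, n + 1):
--         cost[i][0] = min(cost[i - 1][0] + regular[i - 1],
--                          cost[i - 1][1] + express[i - 1])
--         cost[i][1] = min(cost[i][0] + express_cost,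
--                          cost[i - 1][1] + express[i - 1])
--     return [min(c) for c in cost[1:]]
-- ===== SOURCE B (Python) =====
-- def lc_2361(regular, express, express_cost):
--     # Prefix-sum reformulation: the express-lane DP state has the closed form
--     #   e_i = B_i + express_cost + min_{0<=j<=i} (r_j - B_j),
--     # where B_i is the prefix sum of express. So instead of carrying two DP
--     # states, carry the prefix sum B, the regular-lane cost r, and the running
--     # minimum m of r_j - B_j.
--     res = []
--     B = 0  # prefix sum of express
--     r = 0  # cheapest way to stand at stop i on the regular lane
--     m = 0  # min over j<=i of (r_j - B_j); j=0 gives 0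
--     for a, b in zip(regular, express):
--         B += b
--         r = min(r + a, B + express_cost + m)
--         m = min(m, r - B)
--         res.append(min(r, B + express_cost + m))
--     return res
-- ===== Notes on version B (the rewrite author's own statement) =====
-- stated objective: alternative
-- what changed: Replaced the two-state DP table with a prefix-sum reformulation: the express-lane state is eliminated via its closed form e_i = prefix(express)_i + express_cost + min_{j<=i}(r_j - prefix_j), so the single pass carries a prefix sum and a running minimum instead of the second DP row, and builds the answer list in the same pass.
import Mathlib
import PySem

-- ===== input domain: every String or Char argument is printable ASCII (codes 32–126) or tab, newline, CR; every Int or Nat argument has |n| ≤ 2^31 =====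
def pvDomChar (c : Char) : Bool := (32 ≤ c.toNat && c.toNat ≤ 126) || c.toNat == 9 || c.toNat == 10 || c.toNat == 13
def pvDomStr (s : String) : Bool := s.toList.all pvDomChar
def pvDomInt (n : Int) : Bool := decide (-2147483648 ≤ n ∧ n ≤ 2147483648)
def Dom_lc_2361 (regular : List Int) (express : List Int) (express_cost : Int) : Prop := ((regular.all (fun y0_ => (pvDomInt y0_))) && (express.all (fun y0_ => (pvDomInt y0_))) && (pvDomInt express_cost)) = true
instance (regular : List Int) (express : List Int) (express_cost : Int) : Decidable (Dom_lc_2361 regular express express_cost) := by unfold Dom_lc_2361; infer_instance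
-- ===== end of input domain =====

-- ===== PORT A =====
-- B replaces the two-state DP with a prefix-sum + running-minimum formulation; objective: alternative.
-- A's loop `for i in range(1, n+1)` reads regular[i-1], express[i-1] and appends row i computed from row i-1;
-- ported as a fold over the paired elements (same traversal) with the growing table as state; the final
-- `[min(c) for c in cost[1:]]` is a separate map pass. Indexing is in range on every Pre_ input
-- (Python raises IndexError exactly when express is shorter than regular; excluded by Pre_).
def lc_2361 (regular : List Int) (express : List Int) (express_cost : Int) : List Int :=
  let cost : List (Int × Int) :=
    (regular.zip express).foldl
      (fun cost re =>
        let prev := cost.getLast!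
        let c0 := min (prev.1 + re.1) (prev.2 + re.2)
        let c1 := min (c0 + express_cost) (prev.2 + re.2)
        cost ++ [(c0, c1)])
      [(0, express_cost)]
  (cost.drop 1).map (fun c => min c.1 c.2)

-- ===== PORT B =====
-- B: the express-lane state has the closed form e_i = B_i + express_cost + min_{j≤i}(r_j - B_j)
-- (B = prefix sum of express); the loop carries B, the regular-lane cost r, and the running min m.
def lc2361Go (express_cost : Int) : Int → Int → Int → List Int → List Int → List Int
  | _, _, _, [], _ => []
  | _, _, _, _ :: _, [] => []
  | B, r, m, a :: rs, b :: es =>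
    let B' := B + b
    let r' := min (r + a) (B' + express_cost + m)
    let m' := min m (r' - B')
    min r' (B' + express_cost + m') :: lc2361Go express_cost B' r' m' rs es

def lc_2361_alt (regular : List Int) (express : List Int) (express_cost : Int) : List Int :=
  lc2361Go express_cost 0 0 0 regular express

-- ===== PRECONDITION & SPEC =====
-- Pre_ excludes exactly the inputs where A raises IndexError: express shorter than regular.
def Pre_lc_2361 (regular : List Int) (express : List Int) (express_cost : Int) : Prop :=
  regular.length ≤ express.length
instance (regular : List Int) (express : List Int) (express_cost : Int) : Decidable (Pre_lc_2361 regular express express_cost) := by unfold Pre_lc_2361; infer_instance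
def pvWitness_lc_2361 : List Int × List Int × Int := ([1, 3, 2], [5, 1, 4], 3)

def Spec_lc_2361 (regular : List Int) (express : List Int) (express_cost : Int) (out : List Int) : Prop := out = lc_2361_alt regular express express_cost
instance (regular : List Int) (express : List Int) (express_cost : Int) (out : List Int) : Decidable (Spec_lc_2361 regular express express_cost out) := by unfold Spec_lc_2361; infer_instance

-- ===== CLAIM (what is proved, stated in full; the proofs are below) =====
def Claim_equal_lc_2361 : Prop := ∀ (regular : List Int) (express : List Int) (express_cost : Int), Dom_lc_2361 regular express express_cost → Pre_lc_2361 regular express express_cost → Spec_lc_2361 regular express express_cost (lc_2361 regular express express_cost)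

-- ===== LEMMAS AND PROOFS =====

-- the rows appended by A's loop, as a standalone recursion on the pending pairs
def lc2361Rows (express_cost : Int) : Int × Int → List (Int × Int) → List (Int × Int)
  | _, [] => []
  | p, re :: t =>
    let c0 := min (p.1 + re.1) (p.2 + re.2)
    let c1 := min (c0 + express_cost) (p.2 + re.2)
    (c0, c1) :: lc2361Rows express_cost (c0, c1) t

theorem lc2361_getLast!_append (acc : List (Int × Int)) (q : Int × Int) :
    (acc ++ [q]).getLast! = q := by
  induction acc with
  | nil => rfl
  | cons a as ih =>
    cases as with
    | nil => rfl
    | cons b bs => simp [List.getLast!]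

theorem lc2361_foldl_eq_rows (ec : Int) (l : List (Int × Int)) :
    ∀ (acc : List (Int × Int)), acc ≠ [] →
      l.foldl
        (fun cost re =>
          let prev := cost.getLast!
          let c0 := min (prev.1 + re.1) (prev.2 + re.2)
          let c1 := min (c0 + ec) (prev.2 + re.2)
          cost ++ [(c0, c1)])
        acc = acc ++ lc2361Rows ec acc.getLast! l := by
  induction l with
  | nil => intro acc _; simp [lc2361Rows]
  | cons re t ih =>
    intro acc hacc
    simp only [List.foldl_cons]
    rw [ih (acc ++ [_]) (by simp)]
    have hlast : (acc ++ [(min (acc.getLast!.1 + re.1) (acc.getLast!.2 + re.2),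
        min (min (acc.getLast!.1 + re.1) (acc.getLast!.2 + re.2) + ec) (acc.getLast!.2 + re.2))]).getLast!
        = (min (acc.getLast!.1 + re.1) (acc.getLast!.2 + re.2),
        min (min (acc.getLast!.1 + re.1) (acc.getLast!.2 + re.2) + ec) (acc.getLast!.2 + re.2)) := by
      exact lc2361_getLast!_append acc _
    rw [hlast]
    simp [lc2361Rows]

-- the invariant: A's state (reg, exp) corresponds to B's (B, r, m) via reg = r, exp = B + ec + m
theorem lc2361_rows_map_eq_go (ec : Int) :
    ∀ (rs es : List Int) (B r m : Int),
      (lc2361Rows ec (r, B + ec + m) (rs.zip es)).map (fun c => min c.1 c.2)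
        = lc2361Go ec B r m rs es := by
  intro rs
  induction rs with
  | nil => intro es B r m; simp [lc2361Rows, lc2361Go]
  | cons a rs ih =>
    intro es B r m
    cases es with
    | nil => simp [lc2361Rows, lc2361Go]
    | cons b es =>
      simp only [List.zip_cons_cons, lc2361Rows, lc2361Go, List.map_cons]
      rw [show min (r + a) (B + ec + m + b) = min (r + a) (B + b + ec + m) by omega]
      rw [show min (min (r + a) (B + b + ec + m) + ec) (B + ec + m + b)
            = B + b + ec + min m (min (r + a) (B + b + ec + m) - (B + b)) by omega]
      rw [ih]

-- ===== VERDICT (by name: the statement is the Claim_ definition above) =====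
theorem lc_2361_spec : Claim_equal_lc_2361 := by
  intro regular express ec _ _
  unfold Spec_lc_2361 lc_2361 lc_2361_alt
  rw [lc2361_foldl_eq_rows ec _ [(0, ec)] (by simp)]
  have h : ([((0 : Int), ec)]).getLast! = (0, ec) := rfl
  rw [h, List.singleton_append]
  show List.map _ (List.drop 1 ((0, ec) :: lc2361Rows ec (0, ec) (regular.zip express))) = _
  rw [List.drop_one, List.tail_cons]
  have := lc2361_rows_map_eq_go ec regular express 0 0 0
  simpa using this
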